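-- pv_equiv track=rewrite | github.com/lucinamay/biosynfoni | src/biosynfoni/inoutput.py | get_twovals
-- ===== SOURCE A (Python) =====
-- def get_twovals(
--     entry: list[str], start1: str, start2: str, start_val_sep=" - "
-- ) -> list[str]:
--     val1, val2 = "", ""
--     for line in entry:
--         if line.startswith(start1):
--             val1 = line.split(start_val_sep)[-1]
--         elif line.startswith(start2):
--             val2 = line.split(start_val_sep)[-1]
--     return [val1, val2]
-- ===== SOURCE B (Python) =====
-- def get_twovals(
--     entry: list[str], start1: str, start2: str, start_val_sep=" - "
-- ) -> list[str]:
--     # Scan from the end: the first hit from the back is the last hit from the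
--     # front, so we can stop as soon as both values are found.
--     val1, val2 = "", ""
--     found1 = found2 = False
--     for line in reversed(entry):
--         if not found1 and line.startswith(start1):
--             val1 = line.split(start_val_sep)[-1]
--             found1 = True
--         elif not found2 and line.startswith(start2) and not line.startswith(start1):
--             val2 = line.split(start_val_sep)[-1]
--             found2 = True
--         if found1 and found2:
--             break
--     return [val1, val2]
-- ===== Notes on version B (the rewrite author's own statement) =====
-- stated objective: alternative
-- what changed: B scans the entry from the end with found1/found2 flags and breaks as soon as both values are located (first hit from the back = last hit from the front), instead of A's full forward pass that keeps overwriting val1/val2.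
import Mathlib
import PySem

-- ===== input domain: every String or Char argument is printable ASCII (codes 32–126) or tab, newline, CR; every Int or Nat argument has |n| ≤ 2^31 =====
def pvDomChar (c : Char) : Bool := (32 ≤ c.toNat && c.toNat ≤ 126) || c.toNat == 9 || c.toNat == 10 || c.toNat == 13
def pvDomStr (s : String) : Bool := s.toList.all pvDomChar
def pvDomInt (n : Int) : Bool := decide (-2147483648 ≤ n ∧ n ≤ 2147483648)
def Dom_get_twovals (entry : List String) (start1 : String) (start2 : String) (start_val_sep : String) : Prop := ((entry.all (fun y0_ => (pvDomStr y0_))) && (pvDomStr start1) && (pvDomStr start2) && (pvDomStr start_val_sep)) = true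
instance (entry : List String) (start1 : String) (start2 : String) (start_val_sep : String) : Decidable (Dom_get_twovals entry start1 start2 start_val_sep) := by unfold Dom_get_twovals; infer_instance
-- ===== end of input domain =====

-- B scans the entry from the end with found flags and an early break instead of A's
-- full forward overwrite pass; same return value on all inputs admitted by Pre_.

-- ===== PORT A =====
-- line.split(start_val_sep)[-1]; split? = none exactly where Python raises ValueError
-- (empty separator), excluded by Pre_, and the split result is never empty, so the
-- "" defaults are never used on admitted inputs.
def pvLastField (line sep : String) : String :=
  match PySem.Str.split? line sep with
  | some parts => parts.getLastD ""
  | none => ""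

def get_twovals (entry : List String) (start1 : String) (start2 : String) (start_val_sep : String) : List String :=
  let r := entry.foldl (fun (v : String × String) line =>
    if PySem.Str.startswith line start1 then (pvLastField line start_val_sep, v.2)
    else if PySem.Str.startswith line start2 then (v.1, pvLastField line start_val_sep)
    else v) ("", "")
  [r.1, r.2]

-- ===== PORT B =====
def pvAltLoop (s1 s2 sep : String) : List String → Bool → Bool → String → String → String × String
  | [], _, _, v1, v2 => (v1, v2)
  | line :: rest, f1, f2, v1, v2 =>
    if !f1 && PySem.Str.startswith line s1 then
      let v1' := pvLastField line sep
      if f2 then (v1', v2) else pvAltLoop s1 s2 sep rest true f2 v1' v2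
    else if !f2 && (PySem.Str.startswith line s2 && !PySem.Str.startswith line s1) then
      let v2' := pvLastField line sep
      if f1 then (v1, v2') else pvAltLoop s1 s2 sep rest f1 true v1 v2'
    else pvAltLoop s1 s2 sep rest f1 f2 v1 v2

def get_twovals_alt (entry : List String) (start1 : String) (start2 : String) (start_val_sep : String) : List String :=
  let r := pvAltLoop start1 start2 start_val_sep entry.reverse false false "" ""
  [r.1, r.2]

-- ===== PRECONDITION & SPEC =====
-- Pre_ excludes exactly the inputs where Python A raises ValueError: an empty
-- separator together with at least one line that starts with start1 or start2
-- (B raises there too).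
def Pre_get_twovals (entry : List String) (start1 : String) (start2 : String) (start_val_sep : String) : Prop :=
  start_val_sep ≠ "" ∨ ∀ l ∈ entry, PySem.Str.startswith l start1 = false ∧ PySem.Str.startswith l start2 = false
instance (entry : List String) (start1 : String) (start2 : String) (start_val_sep : String) : Decidable (Pre_get_twovals entry start1 start2 start_val_sep) := by unfold Pre_get_twovals; infer_instance

def pvWitness_get_twovals : List String × String × String × String :=
  (["NAME - alanine", "ID - c1", "NAME - glycine"], "NAME", "ID", " - ")

def Spec_get_twovals (entry : List String) (start1 : String) (start2 : String) (start_val_sep : String) (out : List String) : Prop := out = get_twovals_alt entry start1 start2 start_val_sep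
instance (entry : List String) (start1 : String) (start2 : String) (start_val_sep : String) (out : List String) : Decidable (Spec_get_twovals entry start1 start2 start_val_sep out) := by unfold Spec_get_twovals; infer_instance

-- ===== CLAIM (what is proved, stated in full; the proofs are below) =====
def Claim_equal_get_twovals : Prop := ∀ (entry : List String) (start1 : String) (start2 : String) (start_val_sep : String), Dom_get_twovals entry start1 start2 start_val_sep → Pre_get_twovals entry start1 start2 start_val_sep → Spec_get_twovals entry start1 start2 start_val_sep (get_twovals entry start1 start2 start_val_sep)

-- ===== LEMMAS AND PROOFS =====

-- last field of the first line (from the front of L) starting with s1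
def pvR1 (s1 sep : String) : List String → Option String
  | [] => none
  | x :: L => if PySem.Str.startswith x s1 then some (pvLastField x sep) else pvR1 s1 sep L

-- same, for lines starting with s2 but not s1 (A's elif)
def pvR2 (s1 s2 sep : String) : List String → Option String
  | [] => none
  | x :: L => if PySem.Str.startswith x s2 && !PySem.Str.startswith x s1 then some (pvLastField x sep) else pvR2 s1 s2 sep L

theorem pvR1_append (s1 sep : String) (L1 L2 : List String) :
    pvR1 s1 sep (L1 ++ L2) = ((pvR1 s1 sep L1).or (pvR1 s1 sep L2)) := by
  induction L1 with
  | nil => simp [pvR1]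
  | cons x L ih => simp only [List.cons_append, pvR1]; split_ifs <;> simp [ih]

theorem pvR2_append (s1 s2 sep : String) (L1 L2 : List String) :
    pvR2 s1 s2 sep (L1 ++ L2) = ((pvR2 s1 s2 sep L1).or (pvR2 s1 s2 sep L2)) := by
  induction L1 with
  | nil => simp [pvR2]
  | cons x L ih => simp only [List.cons_append, pvR2]; split_ifs <;> simp [ih]

theorem pvAltLoop_eq (s1 s2 sep : String) (L : List String) :
    ∀ (f1 f2 : Bool) (v1 v2 : String),
    pvAltLoop s1 s2 sep L f1 f2 v1 v2 =
      ((if f1 then v1 else (pvR1 s1 sep L).getD v1),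
       (if f2 then v2 else (pvR2 s1 s2 sep L).getD v2)) := by
  induction L with
  | nil => intro f1 f2 v1 v2; cases f1 <;> cases f2 <;> simp [pvAltLoop, pvR1, pvR2]
  | cons x L ih =>
    intro f1 f2 v1 v2
    simp only [pvAltLoop, pvR1, pvR2]
    cases f1 <;> cases f2 <;>
      cases h1 : PySem.Str.startswith x s1 <;>
      cases h2 : PySem.Str.startswith x s2 <;>
      simp [h1, h2, ih]

theorem pvFoldl_eq (s1 s2 sep : String) (xs : List String) :
    ∀ (v : String × String),
    xs.foldl (fun (v : String × String) line =>
      if PySem.Str.startswith line s1 then (pvLastField line sep, v.2)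
      else if PySem.Str.startswith line s2 then (v.1, pvLastField line sep)
      else v) v =
      ((pvR1 s1 sep xs.reverse).getD v.1, (pvR2 s1 s2 sep xs.reverse).getD v.2) := by
  induction xs with
  | nil => intro v; simp [pvR1, pvR2]
  | cons x xs ih =>
    intro v
    rw [List.foldl_cons, ih, List.reverse_cons, pvR1_append, pvR2_append]
    cases h1 : PySem.Str.startswith x s1 <;> rw [PySem.Str.startswith_eq] at h1 <;>
      cases h2 : PySem.Str.startswith x s2 <;> rw [PySem.Str.startswith_eq] at h2 <;>
      simp [h1, h2, pvR1, pvR2, Option.or] <;>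
      cases hr1 : pvR1 s1 sep xs.reverse <;> cases hr2 : pvR2 s1 s2 sep xs.reverse <;> simp

-- ===== VERDICT (by name: the statement is the Claim_ definition above) =====
theorem get_twovals_spec : Claim_equal_get_twovals := by
  intro entry start1 start2 start_val_sep _ _
  show get_twovals entry start1 start2 start_val_sep = get_twovals_alt entry start1 start2 start_val_sep
  simp only [get_twovals, get_twovals_alt, pvFoldl_eq, pvAltLoop_eq]
  simp
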